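-- pv_equiv track=rewrite | github.com/tonybnya/master-technical-interviews | leetcode_27_remove_element.py | func
-- ===== SOURCE A (Python) =====
-- def func(nums, val):
--     hashmap = {}
--     k = 0
--
--     for num in nums:
--         if num not in hashmap:
--             hashmap[num] = 1
--         else:
--             hashmap[num] += 1
--
--     for key in hashmap:
--         if key != val:
--             k += hashmap[key]
--
--     return k, nums
-- ===== SOURCE B (Python) =====
-- def func(nums, val):
--     # Single pass with a running counter; no frequency table. Returns nums unchanged.
--     return sum(1 for num in nums if num != val), nums
-- ===== Notes on version B (the rewrite author's own statement) =====
-- stated objective: simpler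
-- what changed: Replaced the two-pass dict solution (build a frequency table over nums, then sum the counts of keys != val) by a single scan keeping one running integer counter of elements != val; no hash table is built.
import Mathlib
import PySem

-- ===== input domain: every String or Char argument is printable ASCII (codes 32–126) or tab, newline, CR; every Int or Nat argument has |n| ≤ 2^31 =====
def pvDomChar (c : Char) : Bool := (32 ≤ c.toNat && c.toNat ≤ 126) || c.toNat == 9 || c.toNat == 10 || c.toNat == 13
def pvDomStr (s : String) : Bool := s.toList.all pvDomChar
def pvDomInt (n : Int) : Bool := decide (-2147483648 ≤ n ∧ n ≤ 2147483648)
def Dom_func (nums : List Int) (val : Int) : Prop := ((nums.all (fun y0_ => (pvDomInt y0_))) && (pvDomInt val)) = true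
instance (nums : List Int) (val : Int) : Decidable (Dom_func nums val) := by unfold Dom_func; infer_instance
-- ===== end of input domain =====

-- B replaces A's dict-then-scan (build a per-value frequency table, then sum counts of keys ≠ val)
-- by a single pass keeping one running integer counter; the return is (count, nums) with nums unchanged.

-- ===== PORT A =====
def func (nums : List Int) (val : Int) : Int × List Int :=
  let hashmap : PySem.Dict Int Int := nums.foldl (fun d num =>
    if d.contains num = false then d.insert num 1 else d.modify num 0 (· + 1)) PySem.Dict.empty
  let k : Int := hashmap.keys.foldl (fun k key => if key ≠ val then k + hashmap.getD key 0 else k) 0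
  (k, nums)

-- ===== PORT B =====
def func_alt (nums : List Int) (val : Int) : Int × List Int :=
  (((nums.countP (fun num => num ≠ val) : Nat) : Int), nums)

-- ===== PRECONDITION & SPEC =====
def Spec_func (nums : List Int) (val : Int) (out : Int × List Int) : Prop := out = func_alt nums val
instance (nums : List Int) (val : Int) (out : Int × List Int) : Decidable (Spec_func nums val out) := by unfold Spec_func; infer_instance

-- ===== CLAIM (what is proved, stated in full; the proofs are below) =====
def Claim_equal_func : Prop := ∀ (nums : List Int) (val : Int), Dom_func nums val → Spec_func nums val (func nums val)

-- ===== LEMMAS AND PROOFS =====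

-- A's build loop (insert-1-or-increment) computes exactly collections.Counter(nums).
lemma build_eq_counter (l : List Int) (d : PySem.Dict Int Int) :
    l.foldl (fun d num =>
      if d.contains num = false then d.insert num 1 else d.modify num 0 (· + 1)) d
    = l.foldl (fun d x => d.modify x 0 (· + 1)) d := by
  induction l generalizing d with
  | nil => rfl
  | cons x xs ih =>
      simp only [List.foldl_cons]
      rcases h : d.contains x with hf | ht
      · rw [if_pos rfl, PySem.Dict.insert, ih]
        simp [PySem.Dict.insert, PySem.Dict.modify, h, PySem.Dict.getD_of_not_contains (h := h)]
      · simp [ih]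

-- A's summing loop unfolds to the sum of f over the kept keys.
lemma foldl_if_add (val : Int) (f : Int → Int) (l : List Int) (a : Int) :
    l.foldl (fun acc x => if x = val then acc else acc + f x) a
    = a + ((l.filter (fun x => !(x == val))).map f).sum := by
  induction l generalizing a with
  | nil => simp
  | cons x xs ih =>
      simp only [List.foldl_cons]
      by_cases hx : x = val <;> simp [hx, ih, add_assoc]

-- Python's dict-key order (first occurrences) is a permutation of Mathlib's dedup.
lemma setOfList_perm_dedup (l : List Int) : (PySem.Set.ofList l).Perm l.dedup := by
  rw [List.perm_ext_iff_of_nodup (PySem.Set.nodup_ofList l) l.nodup_dedup]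
  intro a; simp [PySem.Set.mem_ofList]

theorem func_eq_alt (nums : List Int) (val : Int) : func nums val = func_alt nums val := by
  unfold func func_alt
  simp only [build_eq_counter, ← PySem.Dict.counter_eq_foldl, PySem.Dict.keys_counter,
    PySem.Dict.getD_counter]
  refine Prod.ext ?_ rfl
  show (PySem.Set.ofList nums).foldl
      (fun k key => if key ≠ val then k + (nums.count key : Int) else k) 0 = _
  simp only [ne_eq, ite_not]
  rw [foldl_if_add val (fun key => (nums.count key : Int)) (PySem.Set.ofList nums) 0, zero_add]
  have hperm := ((setOfList_perm_dedup nums).filter (fun key => !(key == val))).map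
      (fun key => (nums.count key : Int))
  rw [hperm.sum_eq]
  have hkey := List.sum_map_count_dedup_filter_eq_countP (fun key => !(key == val)) nums
  have : ((nums.dedup.filter (fun key => !(key == val))).map
      (fun key => (nums.count key : Int))).sum
      = ((((nums.dedup.filter (fun key => !(key == val))).map nums.count).sum : Nat) : Int) := by
    push_cast
    rw [List.map_map]
    rfl
  rw [this, hkey]
  norm_num
  exact List.countP_congr (fun x _ => by simp)

-- ===== VERDICT (by name: the statement is the Claim_ definition above) =====
theorem func_spec : Claim_equal_func := by
  intro nums val _
  unfold Spec_func
  exact func_eq_alt nums val
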